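-- pv_equiv track=rewrite | github.com/standobrov/tech-interview-service-de | assignments/task1/max_bytes.py | max_bytes
-- ===== SOURCE A (Python) =====
-- from collections import deque
--
-- def max_bytes(events):
--     # Sort events by timestamp
--     events.sort(key=lambda x: x['timestamp'])
--
--     window = deque()
--     current_sum = 0
--     max_sum = 0
--
--     for event in events:
--         t = event['timestamp']
--         b = event['bytes']
--
--         # Remove events outside the window [t-4, t]
--         while window and window[0]['timestamp'] < t - 4:
--             removed = window.popleft()
--             current_sum -= removed['bytes']
--
--         # Add current event
--         window.append(event)
--         current_sum += b
--
--         # Update maximum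
--         max_sum = max(max_sum, current_sum)
--
--     return max_sum
-- ===== SOURCE B (Python) =====
-- def max_bytes(events):
--     # Brute force: sort, then for each event (window right end) recompute the
--     # sum of all processed events within [t-4, t] directly.
--     events.sort(key=lambda x: x['timestamp'])
--     best = 0
--     seen = []
--     for ev in events:
--         seen.append(ev)
--         t = ev['timestamp']
--         s = sum(e['bytes'] for e in seen if e['timestamp'] >= t - 4)
--         best = max(best, s)
--     return best
-- ===== Notes on version B (the rewrite author's own statement) =====
-- stated objective: simpler
-- what changed: Replaces the incremental deque sliding window (popleft + running sum) with a direct brute-force recomputation: for each event the window sum over the processed prefix is summed from scratch.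
import Mathlib
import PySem

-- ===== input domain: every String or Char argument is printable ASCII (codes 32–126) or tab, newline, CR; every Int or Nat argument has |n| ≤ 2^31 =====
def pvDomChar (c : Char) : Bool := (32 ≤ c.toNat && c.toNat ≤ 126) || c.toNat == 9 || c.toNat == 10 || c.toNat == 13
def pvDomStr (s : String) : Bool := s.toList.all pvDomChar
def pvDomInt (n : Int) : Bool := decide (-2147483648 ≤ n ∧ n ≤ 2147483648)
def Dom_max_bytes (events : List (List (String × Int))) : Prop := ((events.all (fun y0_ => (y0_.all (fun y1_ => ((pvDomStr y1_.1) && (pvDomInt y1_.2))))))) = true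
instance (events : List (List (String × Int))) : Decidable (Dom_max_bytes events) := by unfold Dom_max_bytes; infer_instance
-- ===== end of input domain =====

-- B replaces A's deque sliding window with a brute-force recomputation of each
-- window sum over the processed prefix (simpler, not faster). Both Pythons sort
-- `events` in place identically; the equivalence proved is about the return value.

-- ===== PORT A =====
-- event['timestamp'] / event['bytes']: first-match dict lookup; Pre_ guarantees the keys exist
def evTs (e : List (String × Int)) : Int := (PySem.Dict.mk e).getD "timestamp" 0
def evBy (e : List (String × Int)) : Int := (PySem.Dict.mk e).getD "bytes" 0

-- the inner `while window and window[0]['timestamp'] < t - 4: popleft; current_sum -= …`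
def popLoop (w : List (List (String × Int))) (t : Int) (cur : Int) :
    List (List (String × Int)) × Int :=
  match w with
  | [] => ([], cur)
  | e :: rest => if evTs e < t - 4 then popLoop rest t (cur - evBy e) else (e :: rest, cur)

-- one iteration of A's for-loop over state (window, current_sum, max_sum)
def stepA (st : List (List (String × Int)) × Int × Int) (event : List (String × Int)) :
    List (List (String × Int)) × Int × Int :=
  let t := evTs event
  let b := evBy event
  let wc := popLoop st.1 t st.2.1
  let cur2 := wc.2 + b
  (wc.1 ++ [event], cur2, max st.2.2 cur2)

def max_bytes (events : List (List (String × Int))) : Int :=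
  let s := PySem.List.sorted events (fun x => evTs x) false
  (s.foldl stepA ([], 0, 0)).2.2

-- ===== PORT B =====
-- one iteration of B's loop over state (seen, best)
def stepB (st : List (List (String × Int)) × Int) (ev : List (String × Int)) :
    List (List (String × Int)) × Int :=
  let seen := st.1 ++ [ev]
  let t := evTs ev
  let s := ((seen.filter (fun e => decide (evTs e ≥ t - 4))).map evBy).sum
  (seen, max st.2 s)

def max_bytes_alt (events : List (List (String × Int))) : Int :=
  let s := PySem.List.sorted events (fun x => evTs x) false
  (s.foldl stepB ([], 0)).2

-- ===== PRECONDITION & SPEC =====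
-- Pre_: every event dict has the keys 'timestamp' and 'bytes' (otherwise A raises KeyError)
def Pre_max_bytes (events : List (List (String × Int))) : Prop :=
  (events.all (fun e => (PySem.Dict.mk e).contains "timestamp" && (PySem.Dict.mk e).contains "bytes")) = true
instance (events : List (List (String × Int))) : Decidable (Pre_max_bytes events) := by
  unfold Pre_max_bytes; infer_instance
def pvWitness_max_bytes : (List (List (String × Int))) :=
  [[("timestamp", 1), ("bytes", 5)], [("timestamp", 3), ("bytes", 2)]]

def Spec_max_bytes (events : List (List (String × Int))) (out : Int) : Prop := out = max_bytes_alt events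
instance (events : List (List (String × Int))) (out : Int) : Decidable (Spec_max_bytes events out) := by unfold Spec_max_bytes; infer_instance

-- ===== CLAIM (what is proved, stated in full; the proofs are below) =====
def Claim_equal_max_bytes : Prop := ∀ (events : List (List (String × Int))), Dom_max_bytes events → Pre_max_bytes events → Spec_max_bytes events (max_bytes events)

-- ===== LEMMAS AND PROOFS =====

-- sum of the bytes fields
def SB (l : List (List (String × Int))) : Int := (l.map evBy).sum

lemma SB_append (l l' : List (List (String × Int))) : SB (l ++ l') = SB l + SB l' := by
  simp [SB]

lemma SB_split (l : List (List (String × Int))) (p : List (String × Int) → Bool) :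
    SB l = SB (l.filter p) + SB (l.filter (fun x => !p x)) := by
  induction l with
  | nil => rfl
  | cons x t ih =>
    by_cases h : p x = true <;> (simp [SB, h] at *; omega)

lemma popLoop_eq (w : List (List (String × Int))) (t cur : Int)
    (hw : w.Pairwise (fun a b => evTs a ≤ evTs b)) :
    popLoop w t cur =
      (w.filter (fun e => decide (t - 4 ≤ evTs e)),
       cur - SB (w.filter (fun e => decide (evTs e < t - 4)))) := by
  induction w generalizing cur with
  | nil => simp [popLoop, SB]
  | cons e rest ih =>
    rcases List.pairwise_cons.mp hw with ⟨he, hrest⟩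
    by_cases h : evTs e < t - 4
    · rw [popLoop]
      simp only [h, if_true]
      rw [ih _ hrest]
      have : decide (t - 4 ≤ evTs e) = false := by simp; omega
      simp [List.filter_cons, h, SB]
      omega
    · rw [popLoop]
      simp only [h, if_false]
      have h1 : decide (t - 4 ≤ evTs e) = true := by simp; omega
      have h2 : decide (evTs e < t - 4) = false := by simp; omega
      rw [List.filter_cons, List.filter_cons, h1, h2]
      
      have hkeep : rest.filter (fun e => decide (t - 4 ≤ evTs e)) = rest := by
        apply List.filter_eq_self.mpr
        intro a ha; simp; have := he a ha; omega
      have hdrop : rest.filter (fun e => decide (evTs e < t - 4)) = [] := by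
        apply List.filter_eq_nil_iff.mpr
        intro a ha; simp; have := he a ha; omega
      rw [hkeep, hdrop]
      simp [SB]


-- the main loop invariant: A's (window, current_sum, max) fold equals B's (seen, best) fold
lemma loop_eq (r : List (List (String × Int))) :
    ∀ (P : List (List (String × Int))) (c mx : Int),
    ((P ++ r).Pairwise (fun a b => evTs a ≤ evTs b)) →
    (∀ e ∈ r, c ≤ evTs e - 4) →
    (r.foldl stepA (P.filter (fun e => decide (c ≤ evTs e)),
        SB (P.filter (fun e => decide (c ≤ evTs e))), mx)).2.2
      = (r.foldl stepB (P, mx)).2 := by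
  induction r with
  | nil => intro P c mx _ _; simp
  | cons ev r' ih =>
    intro P c mx hsort hc
    have hPp : P.Pairwise (fun a b => evTs a ≤ evTs b) := (List.pairwise_append.mp hsort).1
    have hW : (P.filter (fun e => decide (c ≤ evTs e))).Pairwise (fun a b => evTs a ≤ evTs b) :=
      hPp.filter _
    have hcev : c ≤ evTs ev - 4 := hc ev (by simp)
    have h2 : (P.filter (fun e => decide (c ≤ evTs e))).filter
        (fun e => decide (evTs ev - 4 ≤ evTs e)) = P.filter (fun e => decide (evTs ev - 4 ≤ evTs e)) := by
      rw [List.filter_filter]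
      apply List.filter_congr
      intro a _
      by_cases h : evTs ev - 4 ≤ evTs a
      · have hca : c ≤ evTs a := by omega
        simp [h, hca]
      · simp [h]
    have hnot : (P.filter (fun e => decide (c ≤ evTs e))).filter
        (fun x => !decide (evTs x < evTs ev - 4))
        = (P.filter (fun e => decide (c ≤ evTs e))).filter (fun e => decide (evTs ev - 4 ≤ evTs e)) := by
      apply List.filter_congr
      intro a _
      by_cases h : evTs ev - 4 ≤ evTs a <;> simp [h] <;> try omega
    have h3 : SB (P.filter (fun e => decide (c ≤ evTs e)))
        - SB ((P.filter (fun e => decide (c ≤ evTs e))).filter (fun e => decide (evTs e < evTs ev - 4)))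
        = SB (P.filter (fun e => decide (evTs ev - 4 ≤ evTs e))) := by
      have hsplit := SB_split (P.filter (fun e => decide (c ≤ evTs e)))
        (fun e => decide (evTs e < evTs ev - 4))
      rw [hnot, h2] at hsplit
      omega
    have h4 : (P ++ [ev]).filter (fun e => decide (evTs ev - 4 ≤ evTs e))
        = P.filter (fun e => decide (evTs ev - 4 ≤ evTs e)) ++ [ev] := by
      rw [List.filter_append]
      simp [List.filter]
    have hstepA : stepA (P.filter (fun e => decide (c ≤ evTs e)),
        SB (P.filter (fun e => decide (c ≤ evTs e))), mx) ev
        = ((P ++ [ev]).filter (fun e => decide (evTs ev - 4 ≤ evTs e)),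
           SB ((P ++ [ev]).filter (fun e => decide (evTs ev - 4 ≤ evTs e))),
           max mx (SB ((P ++ [ev]).filter (fun e => decide (evTs ev - 4 ≤ evTs e))))) := by
      simp only [stepA]
      rw [popLoop_eq _ _ _ hW]
      simp only [h4, SB_append, h2, h3]
      simp [SB]
    have hstepB : stepB (P, mx) ev
        = (P ++ [ev], max mx (SB ((P ++ [ev]).filter (fun e => decide (evTs ev - 4 ≤ evTs e))))) := by
      simp only [stepB, SB, ge_iff_le]
    have hsort' : ((P ++ [ev]) ++ r').Pairwise (fun a b => evTs a ≤ evTs b) := by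
      rw [List.append_assoc]; simpa using hsort
    have hc' : ∀ e ∈ r', evTs ev - 4 ≤ evTs e - 4 := by
      intro e he
      have hpc : (ev :: r').Pairwise (fun a b => evTs a ≤ evTs b) :=
        (List.pairwise_append.mp hsort).2.1
      have := (List.pairwise_cons.mp hpc).1 e he
      omega
    rw [List.foldl_cons, List.foldl_cons, hstepA, hstepB]
    exact ih (P ++ [ev]) (evTs ev - 4) _ hsort' hc'

lemma evTs_bound (events : List (List (String × Int))) (hdom : Dom_max_bytes events)
    (e : List (String × Int)) (he : e ∈ events) :
    -2147483648 ≤ evTs e ∧ evTs e ≤ 2147483648 := by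
  unfold Dom_max_bytes at hdom
  simp only [List.all_eq_true] at hdom
  rcases hg : (PySem.Dict.mk e).get? "timestamp" with _ | v
  · rw [evTs, PySem.Dict.getD_eq_get?_getD, hg]
    norm_num
  · have hm : ("timestamp", v) ∈ (PySem.Dict.mk e).items := PySem.Dict.mem_items_of_get?_eq_some _ hg
    have hv := (Bool.and_eq_true _ _ |>.mp (hdom e he ("timestamp", v) hm)).2
    unfold pvDomInt at hv
    rw [evTs, PySem.Dict.getD_eq_get?_getD, hg]
    simp at hv ⊢
    omega

-- ===== VERDICT (by name: the statement is the Claim_ definition above) =====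
theorem max_bytes_spec : Claim_equal_max_bytes := by
  intro events hdom _
  show max_bytes events = max_bytes_alt events
  unfold max_bytes max_bytes_alt
  have hmain := loop_eq (PySem.List.sorted events (fun x => evTs x) false) [] (-2147483652) 0
    (by simpa using PySem.List.sorted_pairwise events (fun x => evTs x))
    (by
      intro e he
      have hmem : e ∈ events := (PySem.List.mem_sorted _ _ _ _).mp he
      have := evTs_bound events hdom e hmem
      omega)
  simpa [SB] using hmain
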